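-- pv_equiv track=rewrite | github.com/posl/comment_recommendation | script/mod_gen/4_time/en/216_C/1.py | solve
-- ===== SOURCE A (Python) =====
-- def solve(n):
--     s = ''
--     while n > 0:
--         if n % 2 == 0:
--             s = 'B' + s
--             n //= 2
--         else:
--             s = 'A' + s
--             n -= 1
--     return s
-- ===== SOURCE B (Python) =====
-- def solve(n):
--     if n <= 0:
--         return ''
--     bits = bin(n)[2:]
--     out = ['A']
--     for b in bits[1:]:
--         out.append('B')
--         if b == '1':
--             out.append('A')
--     return ''.join(out)
-- ===== Notes on version B (the rewrite author's own statement) =====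
-- stated objective: idiomatic
-- what changed: Instead of the destructive halve/decrement loop that prepends characters, B reads the precomputed binary representation bin(n) once MSB-first, emitting 'A' for the leading bit and 'B' (plus 'A' when set) for each later bit.
import Mathlib
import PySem

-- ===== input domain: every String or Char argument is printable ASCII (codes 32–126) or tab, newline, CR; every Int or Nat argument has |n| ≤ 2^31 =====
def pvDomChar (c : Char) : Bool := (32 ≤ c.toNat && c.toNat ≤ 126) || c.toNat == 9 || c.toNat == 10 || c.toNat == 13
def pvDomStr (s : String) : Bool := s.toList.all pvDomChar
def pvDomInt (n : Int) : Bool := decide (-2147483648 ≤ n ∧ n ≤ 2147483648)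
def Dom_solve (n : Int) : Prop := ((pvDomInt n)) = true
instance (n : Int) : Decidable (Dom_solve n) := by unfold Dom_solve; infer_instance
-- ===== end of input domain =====

-- B replaces A's destructive halve/decrement loop (prepending chars) by one forward pass
-- over the binary digits of n; objective: idiomatic, same result on every Int.

-- ===== PORT A =====
-- while n > 0: even → prepend 'B', n //= 2; odd → prepend 'A', n -= 1
def solveLoop (n : Int) (s : String) : String :=
  if _h : 0 < n then
    if PySem.Int.mod n 2 == 0 then
      solveLoop (PySem.Int.floordiv n 2) ("B" ++ s)
    else
      solveLoop (n - 1) ("A" ++ s)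
  else s
termination_by n.toNat
decreasing_by
  · rw [PySem.Int.floordiv_eq_ediv_of_pos (by norm_num : (0:Int) < 2)]; omega
  · omega

def solve (n : Int) : String := solveLoop n ""

-- ===== PORT B =====
-- binChars m = the chars of bin(m)[2:] (exact for m ≥ 1: MSB-first binary digits)
def binChars (m : Nat) : List Char :=
  if _h : m = 0 then [] else binChars (m / 2) ++ [if m % 2 == 1 then '1' else '0']
termination_by m
decreasing_by omega

-- loop body of Source B: append 'B', and also 'A' when the bit is set
def altStep (acc : List Char) (b : Char) : List Char :=
  if b == '1' then acc ++ ['B', 'A'] else acc ++ ['B']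

def solve_alt (n : Int) : String :=
  if n ≤ 0 then "" else
    String.ofList ((binChars n.toNat).tail.foldl altStep ['A'])

-- ===== PRECONDITION & SPEC =====
def Spec_solve (n : Int) (out : String) : Prop := out = solve_alt n
instance (n : Int) (out : String) : Decidable (Spec_solve n out) := by unfold Spec_solve; infer_instance

-- ===== CLAIM (what is proved, stated in full; the proofs are below) =====
def Claim_equal_solve : Prop := ∀ (n : Int), Dom_solve n → Spec_solve n (solve n)

-- ===== LEMMAS AND PROOFS =====

-- B's digit pass, as a function of the number
def altOut (m : Nat) : List Char := (binChars m).tail.foldl altStep ['A']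

theorem binChars_ne_nil {m : Nat} (h : 0 < m) : binChars m ≠ [] := by
  rw [binChars]
  simp [Nat.pos_iff_ne_zero.mp h]

theorem foldl_altStep_append (init l : List Char) (c : Char) :
    (l ++ [c]).foldl altStep init = altStep (l.foldl altStep init) c := by
  simp [List.foldl_append]

theorem tail_append_singleton {l : List Char} (h : l ≠ []) (c : Char) :
    (l ++ [c]).tail = l.tail ++ [c] := by
  cases l with
  | nil => exact absurd rfl h
  | cons a t => simp

theorem altOut_even {m : Nat} (h : 0 < m) (he : m % 2 = 0) :
    altOut m = altOut (m / 2) ++ ['B'] := by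
  have h2 : 0 < m / 2 := by omega
  unfold altOut
  rw [binChars, dif_neg (by omega : ¬ m = 0), he]
  rw [tail_append_singleton (binChars_ne_nil h2), foldl_altStep_append]
  simp [altStep]

theorem altOut_odd {m : Nat} (h : 1 < m) (ho : m % 2 = 1) :
    altOut m = altOut (m / 2) ++ ['B', 'A'] := by
  have h2 : 0 < m / 2 := by omega
  unfold altOut
  rw [binChars, dif_neg (by omega : ¬ m = 0), ho]
  rw [tail_append_singleton (binChars_ne_nil h2), foldl_altStep_append]
  simp [altStep]

theorem ofList_append_left (a b : List Char) (s : String) :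
    String.ofList (a ++ b) ++ s = String.ofList a ++ (String.ofList b ++ s) := by
  rw [String.ofList_append, String.append_assoc]

theorem altOut_one : altOut 1 = ['A'] := by
  unfold altOut
  rw [binChars, binChars]
  rfl

theorem solveLoop_eq (m : Nat) : ∀ s, 0 < m → solveLoop (m : Int) s = String.ofList (altOut m) ++ s := by
  induction m using Nat.strong_induction_on with
  | _ m ih =>
    intro s hm
    rw [solveLoop, dif_pos (by exact_mod_cast hm : (0:Int) < (m:Int)),
      PySem.Int.mod_eq_emod_of_pos (by norm_num : (0:Int) < 2),
      PySem.Int.floordiv_eq_ediv_of_pos (by norm_num : (0:Int) < 2)]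
    by_cases he : m % 2 = 0
    · have h2 : 0 < m / 2 := by omega
      rw [if_pos (by rw [show ((m:Int) % 2) = 0 by omega]; rfl)]
      rw [show ((m:Int) / 2) = (((m / 2 : Nat)) : Int) by omega]
      rw [ih (m / 2) (by omega) _ h2, altOut_even hm he, ofList_append_left]
    · have ho : m % 2 = 1 := by omega
      rw [if_neg (by rw [show ((m:Int) % 2) = 1 by omega]; simp)]
      rcases Nat.eq_or_lt_of_le hm with h1 | h1
      · -- m = 1
        rw [show ((m:Int) - 1) = (0:Int) by omega, solveLoop, dif_neg (by norm_num)]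
        rw [← h1, altOut_one]
      · -- m ≥ 2, odd: step to the even number m - 1
        rw [show ((m:Int) - 1) = (((m - 1 : Nat)) : Int) by omega]
        have hm1 : 0 < m - 1 := by omega
        have hev : (m - 1) % 2 = 0 := by omega
        rw [ih (m - 1) (by omega) _ hm1]
        rw [altOut_odd h1 ho, altOut_even hm1 hev, show (m - 1) / 2 = m / 2 by omega,
          ofList_append_left, ofList_append_left,
          show (['B','A'] : List Char) = ['B'] ++ ['A'] from rfl,
          String.ofList_append, String.append_assoc]

-- ===== VERDICT (by name: the statement is the Claim_ definition above) =====
theorem solve_spec : Claim_equal_solve := by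
  intro n _
  unfold Spec_solve solve solve_alt
  by_cases hn : n ≤ 0
  · rw [solveLoop, dif_neg (by omega : ¬ 0 < n), if_pos hn]
  · rw [if_neg hn, show n = (n.toNat : Int) by omega,
      solveLoop_eq n.toNat "" (by omega)]
    simp [altOut, Int.toNat_of_nonneg (by omega : (0:Int) ≤ n)]
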